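-- pv_equiv track=rewrite | github.com/notnatedavis/dataProcessingPy | folder/foldImgUnshuf.py | calculate_slice_dimensions
-- ===== SOURCE A (Python) =====
-- import math
--
-- ROUNDING_MODE = 'floor'  # Must be same as in shuffle.py!
--
-- def calculate_slice_dimensions(total_size, num_slices) :
--     # calculate slice dimensions with forced division and consistent rounding
--     # returns list of (start, end) indices for each slice
--     # identical logic reflected in Shuffle.py
--
--     slices = []
--
--     if ROUNDING_MODE == 'floor' :
--         # Floor rounding: slices get floor(total/num_slices), last slice gets remainder
--         base_size = total_size // num_slices
--         remainder = total_size % num_slices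
--
--         start = 0
--         for i in range(num_slices) :
--             # last slice gets any remainder
--             size = base_size + (1 if i == num_slices - 1 else 0) if remainder > 0 else base_size
--             if i == num_slices - 1 and remainder > 1 :
--                 size = base_size + remainder
--             end = start + size
--             slices.append((start, end))
--             start = end
--
--     elif ROUNDING_MODE == 'ceil' :
--
--         # ceil rounding: slices get ceil(total/num_slices), adjust last slice
--         base_size = math.ceil(total_size / num_slices)
--
--         start = 0
--         for i in range(num_slices) :
--             remaining = total_size - start
--             size = min(base_size, remaining) if remaining > 0 else 0
--             end = start + size
--             slices.append((start, end))
--             start = end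
--
--     elif ROUNDING_MODE == 'round' :
--         # round to nearest integer
--         base_size = round(total_size / num_slices)
--
--         start = 0
--         for i in range(num_slices) :
--             remaining = total_size - start
--
--             # last slice gets whatever is left
--             size = min(base_size, remaining) if i < num_slices - 1 else remaining
--             end = start + size
--             slices.append((start, end))
--             start = end
--
--     # ensure cover entire range
--     if slices and slices[-1][1] < total_size :
--         slices[-1] = (slices[-1][0], total_size)
--
--     return slices
-- ===== SOURCE B (Python) =====
-- def calculate_slice_dimensions(total_size, num_slices):
--     # fence-post formulation: build the list of slice boundaries, then pair adjacent ones.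
--     # boundaries are i*base for i in 0..num_slices-1, closed by total_size itself, so the
--     # last slice automatically absorbs the remainder and no remainder is ever computed.
--     base = total_size // num_slices
--     bounds = [i * base for i in range(num_slices)] + [total_size]
--     return list(zip(bounds, bounds[1:]))
-- ===== Notes on version B (the rewrite author's own statement) =====
-- stated objective: simpler
-- what changed: Replaced the running-start accumulator loop with its per-step remainder cases and trailing coverage fixup (plus dead ceil/round branches) by a fence-post formulation: build the list of boundaries (i*base closed by total_size) and zip adjacent boundaries into pairs; the remainder is never computed.
import Mathlib
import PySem

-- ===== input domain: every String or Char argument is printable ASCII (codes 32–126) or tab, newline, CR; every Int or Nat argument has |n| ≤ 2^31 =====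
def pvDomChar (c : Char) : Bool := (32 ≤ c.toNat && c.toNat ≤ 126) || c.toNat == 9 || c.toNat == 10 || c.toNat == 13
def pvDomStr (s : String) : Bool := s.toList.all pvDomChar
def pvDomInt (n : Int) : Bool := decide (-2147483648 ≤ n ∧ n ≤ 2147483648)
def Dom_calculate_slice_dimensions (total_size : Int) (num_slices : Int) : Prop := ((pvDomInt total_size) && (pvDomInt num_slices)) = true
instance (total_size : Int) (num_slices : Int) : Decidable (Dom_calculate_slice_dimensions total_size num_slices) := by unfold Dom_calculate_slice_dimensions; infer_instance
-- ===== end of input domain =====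

-- B replaces A's running-start accumulator loop (with its remainder cases, trailing fixup and
-- dead ceil/round branches) by a fence-post construction: a boundary list zipped with its tail;
-- objective: simpler.

-- ===== PORT A =====
-- literal port of A's 'floor' branch (the only branch that runs: ROUNDING_MODE = 'floor'),
-- the loop as a foldl over range(num_slices) carrying (slices, start), then the coverage fixup.
def calculate_slice_dimensions (total_size : Int) (num_slices : Int) : List (Int × Int) :=
  let base_size := PySem.Int.floordiv total_size num_slices
  let remainder := PySem.Int.mod total_size num_slices
  let res := (PySem.List.pyRange 0 num_slices 1).foldl
    (fun (st : List (Int × Int) × Int) i =>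
      let slices := st.1
      let start := st.2
      let size := if remainder > 0 then base_size + (if i = num_slices - 1 then 1 else 0) else base_size
      let size := if i = num_slices - 1 ∧ remainder > 1 then base_size + remainder else size
      let e := start + size
      (slices ++ [(start, e)], e)) ([], 0)
  let slices := res.1
  match slices.getLast? with
  | some last => if last.2 < total_size then slices.dropLast ++ [(last.1, total_size)] else slices
  | none => slices

-- ===== PORT B =====
-- bounds = [i*base for i in range(num_slices)] + [total_size]; zip(bounds, bounds[1:])
def calculate_slice_dimensions_alt (total_size : Int) (num_slices : Int) : List (Int × Int) :=
  let base := PySem.Int.floordiv total_size num_slices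
  let bounds := (PySem.List.pyRange 0 num_slices 1).map (fun i => i * base) ++ [total_size]
  List.zip bounds (bounds.drop 1)

-- ===== PRECONDITION & SPEC =====
-- Pre_ excludes exactly num_slices = 0, where Python A raises ZeroDivisionError (B raises too).
def Pre_calculate_slice_dimensions (total_size : Int) (num_slices : Int) : Prop := num_slices ≠ 0
instance (total_size : Int) (num_slices : Int) : Decidable (Pre_calculate_slice_dimensions total_size num_slices) := by unfold Pre_calculate_slice_dimensions; infer_instance
def pvWitness_calculate_slice_dimensions : Int × Int := (10, 3)

def Spec_calculate_slice_dimensions (total_size : Int) (num_slices : Int) (out : List (Int × Int)) : Prop := out = calculate_slice_dimensions_alt total_size num_slices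
instance (total_size : Int) (num_slices : Int) (out : List (Int × Int)) : Decidable (Spec_calculate_slice_dimensions total_size num_slices out) := by unfold Spec_calculate_slice_dimensions; infer_instance

-- ===== CLAIM (what is proved, stated in full; the proofs are below) =====
def Claim_equal_calculate_slice_dimensions : Prop := ∀ (total_size : Int) (num_slices : Int), Dom_calculate_slice_dimensions total_size num_slices → Pre_calculate_slice_dimensions total_size num_slices → Spec_calculate_slice_dimensions total_size num_slices (calculate_slice_dimensions total_size num_slices)

-- ===== LEMMAS AND PROOFS =====

-- the step function of A's fold, abstracted over the loop-invariant parameters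
def pvStepA (n b r : Int) (st : List (Int × Int) × Int) (i : Int) : List (Int × Int) × Int :=
  let slices := st.1
  let start := st.2
  let size := if r > 0 then b + (if i = n - 1 then 1 else 0) else b
  let size := if i = n - 1 ∧ r > 1 then b + r else size
  let e := start + size
  (slices ++ [(start, e)], e)

-- invariant of A's fold: starting at index a with start = a*b yields the per-index closed form
lemma pvFoldA_eq (n b r : Int) (hr : 0 ≤ r) :
    ∀ (k : Nat) (a : Int) (acc : List (Int × Int)), a + k = n →
      ((PySem.List.pyRange a n 1).foldl (pvStepA n b r) (acc, a * b)).1 =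
        acc ++ (PySem.List.pyRange a n 1).map
          (fun i => (i * b, i * b + b + (if i = n - 1 then r else 0))) := by
  intro k
  induction k with
  | zero =>
    intro a acc h
    rw [PySem.List.pyRange_one_eq_nil (by omega)]
    simp
  | succ m ih =>
    intro a acc h
    rw [PySem.List.pyRange_one_cons (by omega)]
    simp only [List.foldl_cons, List.map_cons]
    cases m with
    | zero =>
      have ha : a = n - 1 := by omega
      rw [PySem.List.pyRange_one_eq_nil (by omega)]
      simp only [List.foldl_nil, List.map_nil]
      simp only [pvStepA, ha]
      rcases lt_trichotomy r 1 with h1 | h1 | h1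
      · have hr0 : r = 0 := by omega
        simp [hr0]
      · simp [h1]; ring
      · simp [h1]; ring
    | succ m' =>
      have ha : a ≠ n - 1 := by omega
      have hstep : pvStepA n b r (acc, a * b) a = (acc ++ [(a * b, a * b + b)], (a + 1) * b) := by
        simp [pvStepA, ha]; ring
      rw [hstep, ih (a + 1) _ (by omega)]
      simp [ha]

-- B's fence-post zip equals the same per-index closed form, given t = n*b + r
lemma pvZipBounds_eq (n b r t : Int) (ht : n * b + r = t) :
    ∀ (k : Nat) (a : Int), a + k = n →
      (let bd := (PySem.List.pyRange a n 1).map (fun i => i * b) ++ [t]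
       List.zip bd (bd.drop 1)) =
        (PySem.List.pyRange a n 1).map
          (fun i => (i * b, i * b + b + (if i = n - 1 then r else 0))) := by
  intro k
  induction k with
  | zero =>
    intro a h
    rw [PySem.List.pyRange_one_eq_nil (by omega)]
    simp
  | succ m ih =>
    intro a h
    rw [PySem.List.pyRange_one_cons (by omega)]
    cases m with
    | zero =>
      have ha : a = n - 1 := by omega
      rw [PySem.List.pyRange_one_eq_nil (by omega)]
      simp [ha]
      linear_combination -ht
    | succ m' =>
      have ha : a ≠ n - 1 := by omega
      have hnext : PySem.List.pyRange (a + 1) n 1 = (a + 1) :: PySem.List.pyRange (a + 2) n 1 := by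
        rw [PySem.List.pyRange_one_cons (by omega), show a + 1 + 1 = a + 2 from by ring]
      have ihn := ih (a + 1) (by omega)
      simp only [hnext] at ihn ⊢
      simp only [List.map_cons, List.cons_append, List.drop_one, List.tail_cons, List.zip_cons_cons] at ihn ⊢
      rw [ihn]
      simp [ha]
      ring

-- ===== VERDICT (by name: the statement is the Claim_ definition above) =====
theorem calculate_slice_dimensions_spec : Claim_equal_calculate_slice_dimensions := by
  intro t n _ hn
  unfold Spec_calculate_slice_dimensions
  unfold calculate_slice_dimensions calculate_slice_dimensions_alt
  rcases lt_or_gt_of_ne hn with hneg | hpos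
  · rw [PySem.List.pyRange_one_eq_nil (by omega)]
    simp
  · set b := PySem.Int.floordiv t n with hb
    set r := PySem.Int.mod t n with hrdef
    have hr : 0 ≤ r := PySem.Int.mod_nonneg t hpos
    have ht : n * b + r = t := by
      have := PySem.Int.floordiv_mul_add_mod t n
      rw [← hb, ← hrdef] at this
      linarith [this]
    have hfold := pvFoldA_eq n b r hr n.toNat 0 [] (by omega)
    simp only [zero_mul] at hfold
    have hfe : (fun (st : List (Int × Int) × Int) i =>
      let slices := st.1
      let start := st.2
      let size := if r > 0 then b + (if i = n - 1 then 1 else 0) else b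
      let size := if i = n - 1 ∧ r > 1 then b + r else size
      let e := start + size
      (slices ++ [(start, e)], e)) = pvStepA n b r := rfl
    have hzip := pvZipBounds_eq n b r t ht n.toNat 0 (by omega)
    simp only [hfe, hfold, hzip]
    -- the fixup never fires: the last end is (n-1)*b + b + r = t
    have hlast : ((PySem.List.pyRange 0 n 1).map
        (fun i => (i * b, i * b + b + (if i = n - 1 then r else 0)))).getLast? =
        some ((n - 1) * b, (n - 1) * b + b + r) := by
      have hsing : PySem.List.pyRange (n - 1) n 1 = [n - 1] := by
        have hs := PySem.List.pyRange_one_singleton (n - 1)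
        rwa [show (n - 1) + 1 = n by ring] at hs
      rw [PySem.List.pyRange_one_append 0 (n - 1) n (by omega) (by omega), hsing]
      simp
    simp only [List.nil_append, hlast]
    have htot : (n - 1) * b + b + r = t := by nlinarith [ht]
    rw [htot]
    simp
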